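-- pv_equiv track=rewrite | github.com/skinyx/test-tasks | solution.py | friendship
-- ===== SOURCE A (Python) =====
-- def friendship(candy_list) -> int:
--     from math import gcd
--     from collections import Counter
--
--     if len(candy_list) == 0:
--         return 0
--
--     candy_counter = Counter(candy_list)
--     #Чтобы не считать НОД попарно для всех комбинаций количества конфет, отсортируем значения по убыванию и найдём его итеративно, ведь: a % b = b % c = 0 -> a % c = 0
--     #Оставлю только уникальные значения количества конфет: итоговый НОД от этого не изменится
--     unique_counts = sorted(set(candy_counter.values()), reverse=True)
--     #Если попадутся два взаимно простых числа - объявляю 1 НОД'ом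
--     gcd_ = unique_counts.pop()
--     while unique_counts:
--         gcd_ = gcd(gcd_, unique_counts.pop())
--         if gcd_ == 1:
--             return 1
--     return gcd_
-- ===== SOURCE B (Python) =====
-- def friendship(candy_list) -> int:
--     from math import gcd
--     g = 0
--     s = sorted(candy_list)
--     n = len(s)
--     i = 0
--     while i < n:
--         j = i + 1
--         while j < n and s[j] == s[i]:
--             j += 1
--         g = gcd(g, j - i)
--         i = j
--     return g
-- ===== Notes on version B (the rewrite author's own statement) =====
-- stated objective: alternative
-- what changed: B builds no Counter, no value set and no descending pop-loop: it sorts the list once and reads each multiplicity off as the length of a run of equal adjacent elements in a single index scan, folding every run length into a running gcd.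
import Mathlib
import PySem

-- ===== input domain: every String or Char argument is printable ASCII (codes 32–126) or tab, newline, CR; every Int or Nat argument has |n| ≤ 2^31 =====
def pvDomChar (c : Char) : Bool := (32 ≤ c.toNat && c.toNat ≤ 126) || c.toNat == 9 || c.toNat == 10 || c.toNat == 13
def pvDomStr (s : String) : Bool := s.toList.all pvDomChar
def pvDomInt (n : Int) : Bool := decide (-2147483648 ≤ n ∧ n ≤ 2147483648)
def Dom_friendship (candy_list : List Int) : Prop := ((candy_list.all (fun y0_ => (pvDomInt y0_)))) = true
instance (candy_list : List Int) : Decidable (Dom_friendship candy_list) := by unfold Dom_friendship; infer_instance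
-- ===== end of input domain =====

-- B drops the Counter, the value set and the descending pop-loop: it sorts the list
-- and reads each multiplicity off as the length of a run of equal adjacent elements,
-- folding it into a running gcd in one index scan.

-- ===== PORT A =====
-- A's while loop: Python pops from the END of unique_counts; we recurse over the
-- reversed list, i.e. in exactly the pop order, keeping the early 'return 1'.
def friendshipLoopA (g : Int) (l : List Int) : Int :=
  match l with
  | [] => g
  | x :: rest =>
    let g' : Int := (Int.gcd g x : Int)
    if g' = 1 then 1 else friendshipLoopA g' rest

def friendship (candy_list : List Int) : Int :=
  if candy_list.length = 0 then 0
  else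
    let candy_counter := PySem.Dict.counter candy_list
    let unique_counts := PySem.List.sorted (PySem.Set.ofList candy_counter.values) (fun x => x) true
    -- 'gcd_ = unique_counts.pop()' and the further pops: recurse over the reverse
    match unique_counts.reverse with
    | [] => 0   -- unreachable: the counter of a nonempty list has at least one value
    | g0 :: rest => friendshipLoopA g0 rest

-- ===== PORT B =====
-- inner while loop: advance j over the run of elements equal to s[i]
def friendshipInnerB (s : List Int) (v : Int) (j : Nat) : Nat :=
  if h : j < s.length then
    if s[j] = v then friendshipInnerB s v (j + 1) else j
  else j
termination_by s.length - j

-- termination helper for the outer loop (cited in its decreasing_by)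
lemma pv_inner_ge (s : List Int) (v : Int) (j : Nat) : j ≤ friendshipInnerB s v j := by
  unfold friendshipInnerB
  split
  · split
    · have h1 := pv_inner_ge s v (j + 1)
      omega
    · exact le_rfl
  · exact le_rfl
termination_by s.length - j
decreasing_by omega

-- outer while loop over the start index i of the current run
def friendshipLoopB (s : List Int) (g : Int) (i : Nat) : Int :=
  if h : i < s.length then
    let j := friendshipInnerB s s[i] (i + 1)
    friendshipLoopB s ((Int.gcd g ((j : Int) - (i : Int))) : Int) j
  else g
termination_by s.length - i
decreasing_by
  have h1 := pv_inner_ge s s[i] (i + 1)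
  omega

def friendship_alt (candy_list : List Int) : Int :=
  friendshipLoopB (PySem.List.sorted candy_list (fun x => x) false) 0 0

-- ===== PRECONDITION & SPEC =====
def Spec_friendship (candy_list : List Int) (out : Int) : Prop := out = friendship_alt candy_list
instance (candy_list : List Int) (out : Int) : Decidable (Spec_friendship candy_list out) := by unfold Spec_friendship; infer_instance

-- ===== CLAIM (what is proved, stated in full; the proofs are below) =====
def Claim_equal_friendship : Prop := ∀ (candy_list : List Int), Dom_friendship candy_list → Spec_friendship candy_list (friendship candy_list)

-- ===== LEMMAS AND PROOFS =====

-- the multiset of multiplicities of the distinct elements of l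
def pvCountsM (l : List Int) : Multiset Int :=
  ((PySem.List.dedup l).map (fun v => (l.count v : Int)) : List Int)

-- length of the leading run of v (list view of the inner while loop)
def pvRun (v : Int) : List Int → Nat
  | [] => 0
  | x :: t => if x = v then pvRun v t + 1 else 0

-- list view of the outer while loop: peel off one run at a time
def pvPeel (g : Int) (rest : List Int) : Int :=
  match rest with
  | [] => g
  | v :: t => pvPeel ((Int.gcd g ((1 + pvRun v t : Nat) : Int)) : Int) (t.drop (pvRun v t))
termination_by rest.length
decreasing_by
  simp only [List.length_cons, List.length_drop]
  omega

lemma pv_peel_nil (g : Int) : pvPeel g [] = g := by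
  unfold pvPeel
  rfl

lemma pv_peel_cons (g v : Int) (t : List Int) :
    pvPeel g (v :: t)
      = pvPeel ((Int.gcd g ((1 + pvRun v t : Nat) : Int)) : Int) (t.drop (pvRun v t)) := by
  conv_lhs => rw [pvPeel]

-- the index-based inner loop computes the run length
lemma pv_inner_eq (s : List Int) (v : Int) (j : Nat) :
    friendshipInnerB s v j = j + pvRun v (s.drop j) := by
  unfold friendshipInnerB
  split
  · rename_i h
    rw [show s.drop j = s[j] :: s.drop (j + 1) from (List.getElem_cons_drop h).symm]
    by_cases hv : s[j] = v
    · rw [if_pos hv, pv_inner_eq s v (j + 1)]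
      simp only [pvRun, hv, if_pos]
      omega
    · rw [if_neg hv]
      simp [pvRun, hv]
  · rename_i h
    rw [List.drop_eq_nil_of_le (by omega)]
    simp [pvRun]
termination_by s.length - j
decreasing_by omega

-- the index-based outer loop is the peel-off loop on the suffix
lemma pv_loopB_bridge (s : List Int) (g : Int) (i : Nat) :
    friendshipLoopB s g i = pvPeel g (s.drop i) := by
  unfold friendshipLoopB
  split
  · rename_i h
    rw [pv_loopB_bridge s _ (friendshipInnerB s s[i] (i + 1))]
    rw [show s.drop i = s[i] :: s.drop (i + 1) from (List.getElem_cons_drop h).symm]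
    rw [pv_peel_cons, pv_inner_eq s s[i] (i + 1), List.drop_drop]
    have harith : (((i + 1 + pvRun s[i] (s.drop (i + 1)) : Nat) : Int) - (i : Int))
        = ((1 + pvRun s[i] (s.drop (i + 1)) : Nat) : Int) := by
      push_cast
      ring
    rw [harith, Nat.add_comm (i + 1) _]
  · rename_i h
    rw [List.drop_eq_nil_of_le (by omega), pv_peel_nil]
termination_by s.length - i
decreasing_by
  have h1 := pv_inner_ge s s[i] (i + 1)
  omega

-- on a sorted list the leading run of the head is exactly its multiplicity,
-- and what is left after the run is everything different from the head
lemma pv_sorted_head_run (v : Int) (t : List Int) (hp : (v :: t).Pairwise (· ≤ ·)) :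
    pvRun v t = t.count v ∧ t.drop (pvRun v t) = t.filter (fun x => decide (x ≠ v)) := by
  induction t with
  | nil => simp [pvRun]
  | cons x t' ih =>
    have hvx : v ≤ x := (List.pairwise_cons.mp hp).1 x (by simp)
    have hpx : (x :: t').Pairwise (· ≤ ·) := (List.pairwise_cons.mp hp).2
    by_cases hx : x = v
    · subst hx
      obtain ⟨h1, h2⟩ := ih (List.Pairwise.sublist (List.Sublist.cons₂ x (List.sublist_cons_self x t')) hp)
      refine ⟨?_, ?_⟩
      · simp only [pvRun, h1, List.count_cons, BEq.rfl, if_pos]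
      · simp only [pvRun, List.filter_cons]
        have : (decide (x ≠ x)) = false := by simp
        rw [this]
        exact h2
    · have hall : ∀ y ∈ x :: t', y ≠ v := by
        intro y hy
        rcases List.mem_cons.mp hy with hyx | hyt
        · subst hyx; exact hx
        · have hxy : x ≤ y := (List.pairwise_cons.mp hpx).1 y hyt
          intro hyv
          subst hyv
          exact hx (le_antisymm hxy hvx)
      refine ⟨?_, ?_⟩
      · simp only [pvRun, if_neg hx]
        symm
        rw [List.count_eq_zero]
        intro hv
        exact hall v hv rfl
      · simp only [pvRun, if_neg hx, List.drop_zero]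
        symm
        rw [List.filter_eq_self]
        intro a ha
        simp [hall a ha]

-- B's filter removes exactly the copies of v  (used through pv_countsM_cons)
lemma pv_dedup_filter_perm (l : List Int) (v : Int) (hv : v ∈ l) :
    (PySem.List.dedup l).Perm (v :: PySem.List.dedup (l.filter (fun x => decide (x ≠ v)))) := by
  rw [List.perm_ext_iff_of_nodup]
  · intro a
    simp only [PySem.List.dedup_eq_ofList, PySem.Set.mem_ofList, List.mem_cons, List.mem_filter]
    by_cases hav : a = v
    · subst hav; simp [hv]
    · simp [hav]
  · rw [PySem.List.dedup_eq_ofList]; exact PySem.Set.nodup_ofList l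
  · refine List.nodup_cons.mpr ⟨?_, by rw [PySem.List.dedup_eq_ofList]; exact PySem.Set.nodup_ofList _⟩
    rw [PySem.List.dedup_eq_ofList, PySem.Set.mem_ofList, List.mem_filter]
    simp

lemma pv_countsM_cons (l : List Int) (v : Int) (hv : v ∈ l) :
    pvCountsM l = (l.count v : Int) ::ₘ pvCountsM (l.filter (fun x => decide (x ≠ v))) := by
  unfold pvCountsM
  have h1 : (↑((PySem.List.dedup l).map (fun u => (l.count u : Int))) : Multiset Int)
      = ↑((v :: PySem.List.dedup (l.filter (fun x => decide (x ≠ v)))).map (fun u => (l.count u : Int))) :=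
    Multiset.coe_eq_coe.mpr ((pv_dedup_filter_perm l v hv).map (fun u => (l.count u : Int)))
  have h2 : (PySem.List.dedup (l.filter (fun x => decide (x ≠ v)))).map (fun u => (l.count u : Int))
      = (PySem.List.dedup (l.filter (fun x => decide (x ≠ v)))).map
          (fun u => ((l.filter (fun x => decide (x ≠ v))).count u : Int)) := by
    apply List.map_congr_left
    intro u hu
    rw [PySem.List.dedup_eq_ofList, PySem.Set.mem_ofList, List.mem_filter] at hu
    exact_mod_cast (List.count_filter (p := fun x => decide (x ≠ v)) (a := u) hu.2).symm
  rw [h1, List.map_cons, ← Multiset.cons_coe, h2]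

-- the peel-off loop on a sorted list computes gcd of the accumulator
-- and the multiset of multiplicities
lemma pv_peel_eq (n : Nat) : ∀ (l : List Int), l.length ≤ n → l.Pairwise (· ≤ ·) →
    ∀ (g : Int), 0 ≤ g → pvPeel g l = gcd g (pvCountsM l).gcd := by
  induction n with
  | zero =>
    intro l hl _ g hg
    have hnil : l = [] := List.eq_nil_of_length_eq_zero (by omega)
    subst hnil
    rw [pv_peel_nil]
    show g = gcd g (pvCountsM []).gcd
    have h0 : pvCountsM [] = 0 := rfl
    rw [h0, Multiset.gcd_zero, gcd_zero_right, Int.normalize_of_nonneg hg]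
  | succ n ih =>
    intro l hl hp g hg
    match l with
    | [] =>
      rw [pv_peel_nil]
      show g = gcd g (pvCountsM []).gcd
      have h0 : pvCountsM [] = 0 := rfl
      rw [h0, Multiset.gcd_zero, gcd_zero_right, Int.normalize_of_nonneg hg]
    | v :: t =>
      obtain ⟨h1, h2⟩ := pv_sorted_head_run v t hp
      have hfe : t.filter (fun x => decide (x ≠ v)) = (v :: t).filter (fun x => decide (x ≠ v)) := by
        rw [List.filter_cons]
        simp
      have hcnt : ((1 + pvRun v t : Nat) : Int) = ((v :: t).count v : Int) := by
        rw [h1, List.count_cons]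
        simp [Nat.add_comm]
      rw [pv_peel_cons, h2, hfe, hcnt]
      have hlt : ((v :: t).filter (fun x => decide (x ≠ v))).length < (v :: t).length :=
        List.length_filter_lt_length_iff_exists.mpr ⟨v, by simp, by simp⟩
      have hps : ((v :: t).filter (fun x => decide (x ≠ v))).Pairwise (· ≤ ·) :=
        List.Pairwise.filter _ hp
      rw [ih _ (Nat.lt_succ_iff.mp (Nat.lt_of_lt_of_le hlt hl)) hps _ (Int.natCast_nonneg _)]
      rw [pv_countsM_cons (v :: t) v (by simp), Multiset.gcd_cons, Int.coe_gcd, gcd_assoc]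

-- the multiset of multiplicities is invariant under permutation (sorting)
lemma pv_countsM_perm (l l' : List Int) (h : l.Perm l') : pvCountsM l = pvCountsM l' := by
  unfold pvCountsM
  have hd : (PySem.List.dedup l).Perm (PySem.List.dedup l') := by
    rw [List.perm_ext_iff_of_nodup
      (by rw [PySem.List.dedup_eq_ofList]; exact PySem.Set.nodup_ofList l)
      (by rw [PySem.List.dedup_eq_ofList]; exact PySem.Set.nodup_ofList l')]
    intro a
    rw [PySem.List.dedup_eq_ofList, PySem.List.dedup_eq_ofList,
      PySem.Set.mem_ofList, PySem.Set.mem_ofList]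
    exact h.mem_iff
  calc (↑((PySem.List.dedup l).map (fun v => (l.count v : Int))) : Multiset Int)
      = ↑((PySem.List.dedup l').map (fun v => (l.count v : Int))) :=
        Multiset.coe_eq_coe.mpr (hd.map _)
    _ = ↑((PySem.List.dedup l').map (fun v => (l'.count v : Int))) := by
        rw [List.map_congr_left (fun a _ => by rw [h.count_eq a])]

-- once the running gcd is 1 it stays 1
lemma pv_foldA_one (l : List Int) :
    l.foldl (fun a x => (Int.gcd a x : Int)) 1 = 1 := by
  induction l with
  | nil => rfl
  | cons x t ih => simpa [List.foldl, Int.one_gcd] using ih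

-- A's early 'return 1' agrees with the plain fold
lemma pv_loopA_eq_foldl (l : List Int) : ∀ (g : Int),
    friendshipLoopA g l = l.foldl (fun a x => (Int.gcd a x : Int)) g := by
  induction l with
  | nil => intro g; rfl
  | cons x t ih =>
    intro g
    show (if ((Int.gcd g x : Int)) = 1 then 1 else friendshipLoopA ((Int.gcd g x : Int)) t)
      = t.foldl (fun a x => (Int.gcd a x : Int)) ((Int.gcd g x : Int))
    by_cases h : ((Int.gcd g x : Int)) = 1
    · rw [if_pos h, h, pv_foldA_one]
    · rw [if_neg h, ih]

-- the plain gcd fold is gcd of the init and the list's multiset gcd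
lemma pv_foldl_gcd (l : List Int) : ∀ (g : Int), 0 ≤ g →
    l.foldl (fun a x => (Int.gcd a x : Int)) g = gcd g (↑l : Multiset Int).gcd := by
  induction l with
  | nil =>
    intro g hg
    show g = gcd g (↑([] : List Int) : Multiset Int).gcd
    have h0 : (↑([] : List Int) : Multiset Int) = 0 := rfl
    rw [h0, Multiset.gcd_zero, gcd_zero_right, Int.normalize_of_nonneg hg]
  | cons x t ih =>
    intro g hg
    simp only [List.foldl]
    rw [ih _ (Int.natCast_nonneg _), ← Multiset.cons_coe, Multiset.gcd_cons,
      Int.coe_gcd, gcd_assoc]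

-- dropping duplicate count values does not change the gcd
lemma pv_gcd_ofList (xs : List Int) :
    (↑(PySem.Set.ofList xs) : Multiset Int).gcd = (↑xs : Multiset Int).gcd := by
  have hperm : (PySem.Set.ofList xs).Perm xs.dedup := by
    rw [List.perm_ext_iff_of_nodup (PySem.Set.nodup_ofList xs) (List.nodup_dedup xs)]
    intro a
    rw [PySem.Set.mem_ofList, List.mem_dedup]
  calc (↑(PySem.Set.ofList xs) : Multiset Int).gcd
      = (↑xs.dedup : Multiset Int).gcd := by rw [Multiset.coe_eq_coe.mpr hperm]
    _ = ((↑xs : Multiset Int).dedup).gcd := by rw [Multiset.coe_dedup]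
    _ = (↑xs : Multiset Int).gcd := Multiset.gcd_dedup _

-- the counter's value list is the multiplicity of each distinct element
lemma pv_values_counter (l : List Int) :
    (PySem.Dict.counter l).values = (PySem.List.dedup l).map (fun v => (l.count v : Int)) := by
  rw [PySem.Dict.values_eq_map_keys _ (PySem.Dict.nodup_keys_counter l) 0,
    PySem.Dict.keys_counter, ← PySem.List.dedup_eq_ofList]
  apply List.map_congr_left
  intro v _
  exact PySem.Dict.getD_counter l v

lemma pv_friendship_cons (c : Int) (cs : List Int) :
    friendship (c :: cs) =
      match (PySem.List.sorted (PySem.Set.ofList (PySem.Dict.counter (c :: cs)).values) (fun x => x) true).reverse with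
      | [] => 0
      | g0 :: rest => friendshipLoopA g0 rest := rfl

-- B computes the gcd of the multiset of multiplicities
lemma pv_alt_eq (l : List Int) : friendship_alt l = (pvCountsM l).gcd := by
  unfold friendship_alt
  rw [pv_loopB_bridge, List.drop_zero]
  rw [pv_peel_eq (PySem.List.sorted l (fun x => x) false).length _ le_rfl
    (PySem.List.sorted_pairwise l (fun x => x)) 0 le_rfl]
  rw [gcd_zero_left, Multiset.normalize_gcd]
  rw [pv_countsM_perm _ l (PySem.List.sorted_perm l (fun x => x) false)]

-- ===== VERDICT (by name: the statement is the Claim_ definition above) =====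
theorem friendship_spec : Claim_equal_friendship := by
  intro candy_list _
  unfold Spec_friendship
  rw [pv_alt_eq]
  match candy_list with
  | [] => rfl
  | c :: cs =>
    have hvals : (PySem.Dict.counter (c :: cs)).values
        = (PySem.List.dedup (c :: cs)).map (fun v => ((c :: cs).count v : Int)) :=
      pv_values_counter (c :: cs)
    rw [pv_friendship_cons]
    set s := PySem.List.sorted (PySem.Set.ofList (PySem.Dict.counter (c :: cs)).values) (fun x => x) true with hs
    have hsne : s ≠ [] := by
      rw [hs, Ne, PySem.List.sorted_eq_nil_iff]
      intro hnil
      have hmem : ((c :: cs).count c : Int) ∈ (PySem.Dict.counter (c :: cs)).values := by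
        rw [hvals]
        exact List.mem_map.mpr ⟨c, by rw [PySem.List.dedup_eq_ofList, PySem.Set.mem_ofList]; simp, rfl⟩
      have h2 := (PySem.Set.mem_ofList _ _).mpr hmem
      rw [hnil] at h2
      simp at h2
    cases hrev : s.reverse with
    | nil => exact absurd (by simpa using congrArg List.reverse hrev) hsne
    | cons g0 rest =>
      have hg0 : 0 ≤ g0 := by
        have hmem : g0 ∈ s := by
          have h0 : g0 ∈ s.reverse := by rw [hrev]; simp
          simpa using h0
        have h1 : g0 ∈ (PySem.Dict.counter (c :: cs)).values := by
          have h2 := (PySem.List.sorted_perm (PySem.Set.ofList (PySem.Dict.counter (c :: cs)).values) (fun x => x) true).mem_iff.mp (hs ▸ hmem)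
          exact (PySem.Set.mem_ofList _ _).mp h2
        rw [hvals] at h1
        obtain ⟨v, _, hv⟩ := List.mem_map.mp h1
        omega
      show friendshipLoopA g0 rest = (pvCountsM (c :: cs)).gcd
      rw [pv_loopA_eq_foldl, pv_foldl_gcd _ _ hg0]
      have h1 : gcd g0 (↑rest : Multiset Int).gcd = (↑(g0 :: rest) : Multiset Int).gcd := by
        rw [← Multiset.cons_coe, Multiset.gcd_cons]
      rw [h1, ← hrev]
      have h2 : (↑s.reverse : Multiset Int) = (↑s : Multiset Int) :=
        Multiset.coe_eq_coe.mpr (List.reverse_perm s)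
      rw [h2, hs]
      have h3 : (↑(PySem.List.sorted (PySem.Set.ofList (PySem.Dict.counter (c :: cs)).values) (fun x => x) true) : Multiset Int)
          = (↑(PySem.Set.ofList (PySem.Dict.counter (c :: cs)).values) : Multiset Int) :=
        Multiset.coe_eq_coe.mpr (PySem.List.sorted_perm _ _ _)
      rw [h3, pv_gcd_ofList, hvals]
      rfl
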